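-- pv_equiv track=rewrite | github.com/kant1724/chatbot_builder | a_builder/util/util.py | alphabet_to_num
-- ===== SOURCE A (Python) =====
-- alpha = ['A', 'B', 'C', 'D', 'E', 'F', 'G', 'H', 'I', 'J']
--
-- def alphabet_to_num(alphabet):
--     num_str = ''
--     for i in range(len(alphabet)):
--         for j in range(len(alpha)):
--             if alphabet[i] == alpha[j]:
--                 num_str += str(j)
--                 break
--     return int(num_str)
-- ===== SOURCE B (Python) =====
-- def alphabet_to_num(alphabet):
--     # idiomatic: compute each digit arithmetically instead of scanning a lookup list
--     num_str = ''.join(chr(ord(c) - 17) for c in alphabet if 'A' <= c <= 'J')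
--     return int(num_str)
-- ===== Notes on version B (the rewrite author's own statement) =====
-- stated objective: idiomatic
-- what changed: The inner linear search over the alpha lookup list is removed: each digit is computed arithmetically (chr(ord(c)-17)) under a range guard, and the digit string is built with a join of a generator instead of repeated concatenation.
import Mathlib
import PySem

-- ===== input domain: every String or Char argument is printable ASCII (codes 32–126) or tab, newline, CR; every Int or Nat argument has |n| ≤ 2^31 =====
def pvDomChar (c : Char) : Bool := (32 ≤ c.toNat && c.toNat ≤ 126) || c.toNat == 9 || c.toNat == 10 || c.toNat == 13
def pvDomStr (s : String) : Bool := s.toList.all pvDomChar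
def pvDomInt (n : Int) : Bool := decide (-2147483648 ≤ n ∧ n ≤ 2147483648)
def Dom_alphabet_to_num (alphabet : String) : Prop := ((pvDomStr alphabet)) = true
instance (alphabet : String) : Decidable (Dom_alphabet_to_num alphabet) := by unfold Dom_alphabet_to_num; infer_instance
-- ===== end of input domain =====

-- B removes A's inner linear search over the alpha lookup list: each digit is computed
-- arithmetically under a range guard and joined at the end (objective: idiomatic).

-- ===== PORT A =====
-- alpha, enumerated with its indices j (the inner loop 'for j in range(len(alpha))')
def pvAlphaEnum : List (Int × Char) :=
  [(0, 'A'), (1, 'B'), (2, 'C'), (3, 'D'), (4, 'E'),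
   (5, 'F'), (6, 'G'), (7, 'H'), (8, 'I'), (9, 'J')]

-- inner loop: first j with alphabet[i] == alpha[j] appends str(j), then break; else nothing
def pvInnerA (c : Char) : List (Int × Char) → String
  | [] => ""
  | (j, a) :: rest => if c = a then PySem.Int.toStr j else pvInnerA c rest

def alphabet_to_num (alphabet : String) : Int :=
  let num_str := alphabet.toList.foldl (fun acc c => acc ++ pvInnerA c pvAlphaEnum) ""
  -- int(num_str): ValueError (num_str empty) is excluded by Pre_alphabet_to_num
  (PySem.Int.ofStr? num_str).getD 0

-- ===== PORT B =====
def alphabet_to_num_alt (alphabet : String) : Int :=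
  -- ''.join(chr(ord(c) - 17) for c in alphabet if 'A' <= c <= 'J')
  let num_str := String.ofList (alphabet.toList.filterMap
    (fun c => if 'A' ≤ c ∧ c ≤ 'J' then some (Char.ofNat (c.toNat - 17)) else none))
  -- int(num_str): ValueError (num_str empty) is excluded by Pre_alphabet_to_num
  (PySem.Int.ofStr? num_str).getD 0

-- ===== PRECONDITION & SPEC =====
-- Pre_ excludes exactly the inputs where int('') raises ValueError in A (and in B):
-- strings containing no character in 'A'..'J'.
def Pre_alphabet_to_num (alphabet : String) : Prop :=
  (alphabet.toList.any (fun c => decide ('A' ≤ c) && decide (c ≤ 'J'))) = true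
instance (alphabet : String) : Decidable (Pre_alphabet_to_num alphabet) := by
  unfold Pre_alphabet_to_num; infer_instance

def pvWitness_alphabet_to_num : String := "CAB"

def Spec_alphabet_to_num (alphabet : String) (out : Int) : Prop := out = alphabet_to_num_alt alphabet
instance (alphabet : String) (out : Int) : Decidable (Spec_alphabet_to_num alphabet out) := by unfold Spec_alphabet_to_num; infer_instance

-- ===== CLAIM (what is proved, stated in full; the proofs are below) =====
def Claim_equal_alphabet_to_num : Prop := ∀ (alphabet : String), Dom_alphabet_to_num alphabet → Pre_alphabet_to_num alphabet → Spec_alphabet_to_num alphabet (alphabet_to_num alphabet)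

-- ===== LEMMAS AND PROOFS =====

-- per-character agreement: A's inner search over alpha yields exactly B's guarded digit
theorem pvInner_eq (c : Char) :
    pvInnerA c pvAlphaEnum =
      (if 'A' ≤ c ∧ c ≤ 'J' then String.ofList [Char.ofNat (c.toNat - 17)] else "") := by
  by_cases h : 'A' ≤ c ∧ c ≤ 'J'
  · have h1 : 65 ≤ c.toNat := by
      have := h.1; simp [Char.le_def] at this; exact this
    have h2 : c.toNat ≤ 74 := by
      have := h.2; simp [Char.le_def] at this; exact this
    have hc : c = Char.ofNat c.toNat := (Char.ofNat_toNat c).symm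
    interval_cases hn : c.toNat <;> rw [hc] <;> decide
  · have hs : ∀ a ∈ pvAlphaEnum, c ≠ a.2 := by
      intro a ha hce
      apply h
      subst hce
      fin_cases ha <;> exact ⟨by decide, by decide⟩
    simp [h]
    have : ∀ (l : List (Int × Char)), (∀ a ∈ l, c ≠ a.2) → pvInnerA c l = "" := by
      intro l
      induction l with
      | nil => intro _; rfl
      | cons hd tl ih =>
        intro hne
        simp [pvInnerA, hne hd (List.mem_cons_self ..)]
        exact ih fun a ha => hne a (List.mem_cons_of_mem _ ha)
    exact this _ hs

theorem pvFold_eq (l : List Char) (s : String) :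
    l.foldl (fun acc c => acc ++ pvInnerA c pvAlphaEnum) s =
      s ++ String.ofList (l.filterMap
        (fun c => if 'A' ≤ c ∧ c ≤ 'J' then some (Char.ofNat (c.toNat - 17)) else none)) := by
  induction l generalizing s with
  | nil => simp [String.ofList_nil]
  | cons hd tl ih =>
    rw [List.foldl_cons, ih, pvInner_eq hd]
    by_cases h : 'A' ≤ hd ∧ hd ≤ 'J'
    · rw [if_pos h]
      have hf : List.filterMap
            (fun c => if 'A' ≤ c ∧ c ≤ 'J' then some (Char.ofNat (c.toNat - 17)) else none) (hd :: tl)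
          = Char.ofNat (hd.toNat - 17) :: List.filterMap
            (fun c => if 'A' ≤ c ∧ c ≤ 'J' then some (Char.ofNat (c.toNat - 17)) else none) tl := by
        simp [h]
      rw [hf, String.append_assoc, ← String.ofList_append, List.singleton_append]
    · rw [if_neg h, String.append_empty]
      have hf : List.filterMap
            (fun c => if 'A' ≤ c ∧ c ≤ 'J' then some (Char.ofNat (c.toNat - 17)) else none) (hd :: tl)
          = List.filterMap
            (fun c => if 'A' ≤ c ∧ c ≤ 'J' then some (Char.ofNat (c.toNat - 17)) else none) tl := by
        simp [h]
      rw [hf]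

-- ===== VERDICT (by name: the statement is the Claim_ definition above) =====
theorem alphabet_to_num_spec : Claim_equal_alphabet_to_num := by
  intro alphabet _ _
  unfold Spec_alphabet_to_num alphabet_to_num alphabet_to_num_alt
  rw [pvFold_eq]
  simp
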